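-- pv_equiv track=rewrite | github.com/joeyshi12/word-search | WordGRS.py | next_words
-- ===== SOURCE A (Python) =====
-- def next_words(word: str, chars: list) -> list:
--     """returns a list of all unique next possible strings"""
--     if not chars:
--         return []
--     else:
--         if chars[0] in chars[1::]:
--             return next_words(word, chars[1::])
--         else:
--             return [word + chars[0]] + next_words(word, chars[1::])
-- ===== SOURCE B (Python) =====
-- def next_words(word: str, chars: list) -> list:
--     """returns a list of all unique next possible strings"""
--     counts = {}
--     for c in chars:
--         counts[c] = counts.get(c, 0) + 1
--     result = []
--     for c in chars:
--         counts[c] -= 1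
--         if counts[c] == 0:
--             result.append(word + c)
--     return result
-- ===== Notes on version B (the rewrite author's own statement) =====
-- stated objective: faster
-- what changed: Replaced the recursive scheme that re-slices the list and scans the whole tail for each element with a two-pass counting approach: build a multiplicity dict once, then one forward pass decrementing counts and emitting a char exactly at its last occurrence.
import Mathlib
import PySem

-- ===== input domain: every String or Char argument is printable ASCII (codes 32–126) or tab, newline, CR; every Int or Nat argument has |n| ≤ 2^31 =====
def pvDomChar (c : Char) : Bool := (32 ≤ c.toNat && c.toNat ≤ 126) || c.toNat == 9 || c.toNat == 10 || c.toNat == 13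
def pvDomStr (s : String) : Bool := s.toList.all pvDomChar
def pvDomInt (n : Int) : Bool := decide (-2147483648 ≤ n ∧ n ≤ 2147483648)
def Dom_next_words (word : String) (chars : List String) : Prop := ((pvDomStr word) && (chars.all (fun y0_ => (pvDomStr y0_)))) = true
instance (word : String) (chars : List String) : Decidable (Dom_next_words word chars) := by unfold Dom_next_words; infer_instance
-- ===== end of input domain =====

-- B replaces A's recursion with a whole-tail membership scan per element by a counting dict
-- built once plus a single decrementing forward pass; objective: faster.

-- ===== PORT A =====
-- chars[1::] of a nonempty list is its tail; 'chars[0] in chars[1::]' is membership by string equality.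
def next_words (word : String) (chars : List String) : List String :=
  match chars with
  | [] => []
  | c :: rest =>
    if c ∈ rest then next_words word rest
    else (word ++ c) :: next_words word rest

-- ===== PORT B =====
-- counts[c] = counts.get(c, 0) + 1 → insert with getD; 'counts[c] -= 1' reads a key that is
-- always present (built in the first pass), ported as getD … 0 then overwrite-insert (exact here).
def next_words_alt (word : String) (chars : List String) : List String :=
  let counts : PySem.Dict String Int :=
    chars.foldl (fun d c => d.insert c (d.getD c 0 + 1)) PySem.Dict.empty
  (chars.foldl
    (fun (st : PySem.Dict String Int × List String) c =>
      let d := st.1.insert c (st.1.getD c 0 - 1)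
      if d.getD c 0 = 0 then (d, st.2 ++ [word ++ c]) else (d, st.2))
    (counts, [])).2

-- ===== PRECONDITION & SPEC =====
def Spec_next_words (word : String) (chars : List String) (out : List String) : Prop := out = next_words_alt word chars
instance (word : String) (chars : List String) (out : List String) : Decidable (Spec_next_words word chars out) := by unfold Spec_next_words; infer_instance

-- ===== CLAIM (what is proved, stated in full; the proofs are below) =====
def Claim_equal_next_words : Prop := ∀ (word : String) (chars : List String), Dom_next_words word chars → Spec_next_words word chars (next_words word chars)

-- ===== LEMMAS AND PROOFS =====

-- B's second pass, started from any dict holding the multiplicities of the remaining list,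
-- appends exactly A's result to the accumulator: a char is emitted precisely at its last occurrence.
lemma next_words_loop (word : String) (l : List String)
    (d : PySem.Dict String Int) (acc : List String)
    (h : ∀ c ∈ l, d.getD c 0 = l.count c) :
    (l.foldl
      (fun (st : PySem.Dict String Int × List String) c =>
        let d := st.1.insert c (st.1.getD c 0 - 1)
        if d.getD c 0 = 0 then (d, st.2 ++ [word ++ c]) else (d, st.2))
      (d, acc)).2 = acc ++ next_words word l := by
  induction l generalizing d acc with
  | nil => simp [next_words]
  | cons c t ih =>
    have hc : d.getD c 0 = ((c :: t).count c : Int) := h c (by simp)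
    have hcount : d.getD c 0 - 1 = (t.count c : Int) := by
      rw [hc, List.count_cons_self]; push_cast; ring
    have hself : (d.insert c (d.getD c 0 - 1)).getD c 0 = (t.count c : Int) := by
      rw [PySem.Dict.getD_insert_self]; exact hcount
    have hinv : ∀ x ∈ t, (d.insert c (d.getD c 0 - 1)).getD x 0 = (t.count x : Int) := by
      intro x hx
      by_cases hxc : x = c
      · subst hxc; exact hself
      · rw [PySem.Dict.getD_insert]
        rw [if_neg hxc, h x (by simp [hx]), List.count_cons]
        simp [Ne.symm hxc]
    by_cases hmem : c ∈ t
    · have hne : ¬ ((d.insert c (d.getD c 0 - 1)).getD c 0 = 0) := by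
        rw [hself]
        have : 0 < t.count c := List.count_pos_iff.mpr hmem
        omega
      have hrw : next_words word (c :: t) = next_words word t := by
        simp [next_words, hmem]
      rw [hrw]
      simp only [List.foldl_cons, if_neg hne]
      exact ih _ _ hinv
    · have hz : (d.insert c (d.getD c 0 - 1)).getD c 0 = 0 := by
        rw [hself]
        simp [List.count_eq_zero_of_not_mem hmem]
      have hrw : next_words word (c :: t) = (word ++ c) :: next_words word t := by
        simp [next_words, hmem]
      rw [hrw]
      simp only [List.foldl_cons, if_pos hz]
      rw [ih _ _ hinv]
      simp

-- ===== VERDICT (by name: the statement is the Claim_ definition above) =====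
theorem next_words_spec : Claim_equal_next_words := by
  intro word chars _
  unfold Spec_next_words
  have hcnt : ∀ c ∈ chars,
      (chars.foldl (fun d c => d.insert c (d.getD c 0 + 1)) PySem.Dict.empty).getD c 0
        = (chars.count c : Int) := by
    intro c _
    rw [PySem.Dict.getD_foldl_insert_add_one, PySem.Dict.getD_empty]
    simp
  have h := next_words_loop word chars _ [] hcnt
  simpa [next_words_alt] using h.symm
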